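-- pv_equiv track=rewrite | github.com/sh95fit/CodingTest | 백준/Silver/1411. 비슷한 단어/비슷한 단어.py | count_similar_pairs
-- ===== SOURCE A (Python) =====
-- def get_pattern(word):
--
--     """ Returns a string representing the pattern of the given word. """
--
--     char_map = {}
--
--     pattern = []
--
--     next_index = 0
--
--     for char in word:
--
--         if char not in char_map:
--
--             char_map[char] = next_index
--
--             next_index += 1
--
--         pattern.append(str(char_map[char]))
--
--     return ''.join(pattern)
--
-- def count_similar_pairs(words):
--
--     pattern_count = {}
--
--
--
--     # Generate patterns for all words and count their occurrences
--
--     for word in words: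
--
--         pattern = get_pattern(word)
--
--         if pattern not in pattern_count:
--
--             pattern_count[pattern] = 0
--
--         pattern_count[pattern] += 1
--
--
--
--     # Calculate the number of similar pairs
--
--     similar_pairs = 0
--
--     for count in pattern_count.values():
--
--         if count > 1:
--
--             similar_pairs += count * (count - 1) // 2  # C(count, 2)
--
--
--
--     return similar_pairs
-- ===== SOURCE B (Python) =====
-- def get_pattern(word):
--     """Canonical letter-repetition pattern of word."""
--     first = {}
--     return ''.join(str(first.setdefault(c, len(first))) for c in word)
--
--
-- def count_similar_pairs(words):
--     seen = {}
--     similar_pairs = 0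
--     for word in words:
--         pattern = get_pattern(word)
--         k = seen.get(pattern, 0)
--         similar_pairs += k
--         seen[pattern] = k + 1
--     return similar_pairs
-- ===== Notes on version B (the rewrite author's own statement) =====
-- stated objective: simpler
-- what changed: B counts similar pairs in a single pass with a running dict of patterns seen so far (adding the current multiplicity before incrementing it), instead of A's two passes (build a full pattern->count dict, then sum C(count,2)); B's canonicalizer uses setdefault(c, len(first)) in place of A's explicit next_index counter.
import Mathlib
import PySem

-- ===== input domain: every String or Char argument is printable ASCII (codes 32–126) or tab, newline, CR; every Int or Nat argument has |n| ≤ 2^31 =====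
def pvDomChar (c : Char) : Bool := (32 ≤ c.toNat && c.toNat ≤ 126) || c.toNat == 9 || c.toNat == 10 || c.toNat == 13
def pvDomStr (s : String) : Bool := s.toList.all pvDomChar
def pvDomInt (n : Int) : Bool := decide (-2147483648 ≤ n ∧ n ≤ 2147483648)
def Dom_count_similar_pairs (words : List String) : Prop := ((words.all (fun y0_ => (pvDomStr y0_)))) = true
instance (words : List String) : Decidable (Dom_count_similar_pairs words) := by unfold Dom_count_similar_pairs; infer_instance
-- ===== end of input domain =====

-- B replaces A's two-pass count (dict of pattern counts, then a C(count,2) sum) by a single pass that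
-- adds the number of previously-seen equal patterns as it goes; objective: simpler.


-- ===== PORT A =====
-- get_pattern: char_map with explicit next_index counter; pattern built as list of digit strings, joined.
def get_pattern (word : String) : String :=
  let st :=
    word.toList.foldl
      (fun (acc : PySem.Dict Char Int × List String × Int) c =>
        let cm := if acc.1.contains c then acc.1 else acc.1.insert c acc.2.2
        let ni := if acc.1.contains c then acc.2.2 else acc.2.2 + 1
        (cm, acc.2.1 ++ [PySem.Int.toStr (cm.getD c 0)], ni))
      (PySem.Dict.empty, [], 0)
  PySem.Str.join "" st.2.1

def count_similar_pairs (words : List String) : Int :=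
  let pattern_count :=
    words.foldl
      (fun (d : PySem.Dict String Int) w =>
        let p := get_pattern w
        let d := if d.contains p then d else d.insert p 0
        d.insert p (d.getD p 0 + 1))
      PySem.Dict.empty
  pattern_count.values.foldl
    (fun s c => if c > 1 then s + PySem.Int.floordiv (c * (c - 1)) 2 else s) 0

-- ===== PORT B =====
-- get_pattern (B): first-occurrence dict via setdefault(c, len(first)).
def get_pattern_alt (word : String) : String :=
  let st :=
    word.toList.foldl
      (fun (acc : PySem.Dict Char Int × List String) c =>
        let v := (acc.1.get? c).getD (acc.1.size : Int)   -- value setdefault returns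
        (acc.1.setdefault c (acc.1.size : Int), acc.2 ++ [PySem.Int.toStr v]))
      (PySem.Dict.empty, [])
  PySem.Str.join "" st.2

def count_similar_pairs_alt (words : List String) : Int :=
  let st :=
    words.foldl
      (fun (acc : PySem.Dict String Int × Int) word =>
        let pattern := get_pattern_alt word
        let k := acc.1.getD pattern 0
        (acc.1.insert pattern (k + 1), acc.2 + k))
      (PySem.Dict.empty, 0)
  st.2

-- ===== PRECONDITION & SPEC =====
def Spec_count_similar_pairs (words : List String) (out : Int) : Prop := out = count_similar_pairs_alt words
instance (words : List String) (out : Int) : Decidable (Spec_count_similar_pairs words out) := by unfold Spec_count_similar_pairs; infer_instance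

-- ===== CLAIM (what is proved, stated in full; the proofs are below) =====
def Claim_equal_count_similar_pairs : Prop := ∀ (words : List String), Dom_count_similar_pairs words → Spec_count_similar_pairs words (count_similar_pairs words)

-- ===== LEMMAS AND PROOFS =====

theorem gp_loop (l : List Char) : ∀ (d : PySem.Dict Char Int) (pat : List String),
    l.foldl
      (fun (acc : PySem.Dict Char Int × List String × Int) c =>
        let cm := if acc.1.contains c then acc.1 else acc.1.insert c acc.2.2
        let ni := if acc.1.contains c then acc.2.2 else acc.2.2 + 1
        (cm, acc.2.1 ++ [PySem.Int.toStr (cm.getD c 0)], ni))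
      (d, pat, (d.size : Int))
    = (let r := l.foldl
        (fun (acc : PySem.Dict Char Int × List String) c =>
          let v := (acc.1.get? c).getD (acc.1.size : Int)
          (acc.1.setdefault c (acc.1.size : Int), acc.2 ++ [PySem.Int.toStr v]))
        (d, pat)
       (r.1, r.2, (r.1.size : Int))) := by
  induction l with
  | nil => intro d pat; rfl
  | cons c l ih =>
    intro d pat
    simp only [List.foldl_cons]
    by_cases h : d.contains c = true
    · have hs : ∃ v, d.get? c = some v := by
        rcases ho : d.get? c with _ | v
        · rw [PySem.Dict.get?_eq_none_iff_contains] at ho; simp [h] at ho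
        · exact ⟨v, rfl⟩
      rcases hs with ⟨v, hv⟩
      have hgd : d.getD c 0 = v := by rw [PySem.Dict.getD_eq_get?_getD, hv]; rfl
      have hgd2 : (d.get? c).getD (d.size : Int) = v := by rw [hv]; rfl
      simp only [h, if_true, PySem.Dict.setdefault_of_contains (h := h), hgd, hgd2]
      exact ih d _
    · have hb : d.contains c = false := by simpa using h
      have hn : d.get? c = none := (PySem.Dict.get?_eq_none_iff_contains d c).mpr hb
      have hsz : ((d.insert c (d.size : Int)).size : Int) = (d.size : Int) + 1 := by
        rw [PySem.Dict.size_insert]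
        simp [hb]
      simp only [hb, Bool.false_eq_true, if_false,
        PySem.Dict.setdefault_of_not_contains (h := hb), hn,
        PySem.Dict.getD_insert_self, Option.getD_none]
      rw [← hsz]
      exact ih _ _

theorem get_pattern_eq (w : String) : get_pattern w = get_pattern_alt w := by
  have h := gp_loop w.toList PySem.Dict.empty []
  simp only [show ((PySem.Dict.empty : PySem.Dict Char Int).size : Int) = 0 from by decide] at h
  unfold get_pattern get_pattern_alt
  rw [h]

def pvC2 (c : Int) : Int := PySem.Int.floordiv (c * (c - 1)) 2
def pvSS (d : PySem.Dict String Int) : Int := (d.keys.map (fun k => pvC2 (d.getD k 0))).sum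

theorem pvC2_succ (v : Int) : pvC2 (v + 1) = pvC2 v + v := by
  unfold pvC2
  rw [PySem.Int.floordiv_eq_ediv_of_pos (by norm_num), PySem.Int.floordiv_eq_ediv_of_pos (by norm_num)]
  have h : (v + 1) * (v + 1 - 1) = v * (v - 1) + v * 2 := by ring
  rw [h, Int.add_mul_ediv_right _ _ (by norm_num)]

theorem sum_map_update {κ : Type} [DecidableEq κ] (K : List κ) (f g : κ → Int) (p : κ) (c : Int)
    (hnd : K.Nodup) (hp : p ∈ K) (hne : ∀ k ∈ K, k ≠ p → g k = f k) (hpc : g p = f p + c) :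
    (K.map g).sum = (K.map f).sum + c := by
  induction K with
  | nil => simp at hp
  | cons a K ih =>
    rcases List.nodup_cons.mp hnd with ⟨ha, hK⟩
    simp only [List.map_cons, List.sum_cons]
    rcases List.mem_cons.mp hp with rfl | hp'
    · have hmap : K.map g = K.map f :=
        List.map_congr_left (fun k hk => hne k (List.mem_cons_of_mem _ hk) (fun e => ha (e ▸ hk)))
      rw [hmap, hpc]; ring
    · have ha' : a ≠ p := fun e => ha (e ▸ hp')
      rw [hne a (List.mem_cons_self) ha',
        ih hK hp' (fun k hk hkp => hne k (List.mem_cons_of_mem _ hk) hkp)]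
      ring

theorem pvSS_insert (d : PySem.Dict String Int) (p : String) (hnd : d.keys.Nodup) :
    pvSS (d.insert p (d.getD p 0 + 1)) = pvSS d + d.getD p 0 := by
  by_cases h : d.contains p = true
  · unfold pvSS
    rw [PySem.Dict.keys_insert_of_contains (h := h)]
    refine sum_map_update _ _ _ p (d.getD p 0) hnd
      ((PySem.Dict.contains_iff_mem_keys d p).mp h) ?_ ?_
    · intro k hk hkp; rw [PySem.Dict.getD_insert]; simp [hkp]
    · rw [PySem.Dict.getD_insert]; simp [pvC2_succ]
  · have hb : d.contains p = false := by simpa using h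
    have hpk : p ∉ d.keys := fun hm => by
      rw [(PySem.Dict.contains_iff_mem_keys d p).mpr hm] at hb; cases hb
    unfold pvSS
    rw [PySem.Dict.keys_insert_of_not_contains (h := hb),
      PySem.Dict.getD_of_not_contains (h := hb)]
    simp only [List.map_append, List.sum_append, List.map_cons, List.map_nil,
      List.sum_cons, List.sum_nil, PySem.Dict.getD_insert_self]
    have hmap : d.keys.map (fun k => pvC2 ((d.insert p (0 + 1)).getD k 0))
        = d.keys.map (fun k => pvC2 (d.getD k 0)) :=
      List.map_congr_left (fun k hk => by
        have hkp : k ≠ p := fun e => hpk (e ▸ hk)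
        rw [PySem.Dict.getD_insert]; simp [hkp])
    rw [hmap]
    have h1 : pvC2 1 = 0 := by decide
    simp [h1]

theorem bfold (l : List String) : ∀ (d : PySem.Dict String Int) (t : Int), d.keys.Nodup →
    (l.foldl (fun (acc : PySem.Dict String Int × Int) p =>
        (acc.1.insert p (acc.1.getD p 0 + 1), acc.2 + acc.1.getD p 0)) (d, t)).2
    = t + pvSS (l.foldl (fun d p => d.insert p (d.getD p 0 + 1)) d) - pvSS d := by
  induction l with
  | nil => intro d t _; simp
  | cons p l ih =>
    intro d t hnd
    simp only [List.foldl_cons]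
    rw [ih _ _ (PySem.Dict.nodup_keys_insert _ _ _ hnd), pvSS_insert d p hnd]
    ring

theorem guardfold (vs : List Int) : ∀ (a : Int), (∀ c ∈ vs, 1 ≤ c) →
    vs.foldl (fun s c => if c > 1 then s + PySem.Int.floordiv (c * (c - 1)) 2 else s) a
    = a + (vs.map pvC2).sum := by
  induction vs with
  | nil => intro a _; simp
  | cons c vs ih =>
    intro a h
    simp only [List.foldl_cons, List.map_cons, List.sum_cons]
    by_cases hc : c > 1
    · rw [if_pos hc, ih _ (fun x hx => h x (List.mem_cons_of_mem _ hx))]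
      unfold pvC2; ring
    · have hc1 : c = 1 := le_antisymm (by omega) (h c List.mem_cons_self)
      subst hc1
      rw [if_neg hc, ih _ (fun x hx => h x (List.mem_cons_of_mem _ hx))]
      have h1 : pvC2 1 = 0 := by decide
      rw [h1]; ring

theorem stepA_eq (d : PySem.Dict String Int) (p : String) :
    (let d' := if d.contains p then d else d.insert p 0
     d'.insert p (d'.getD p 0 + 1)) = d.insert p (d.getD p 0 + 1) := by
  by_cases h : d.contains p = true
  · simp [h]
  · have hb : d.contains p = false := by simpa using h
    simp only [hb, Bool.false_eq_true, if_false]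
    rw [PySem.Dict.insert_insert_self, PySem.Dict.getD_insert_self,
      PySem.Dict.getD_of_not_contains (h := hb)]

theorem count_similar_pairs_spec' (words : List String) :
    count_similar_pairs words = count_similar_pairs_alt words := by
  unfold count_similar_pairs count_similar_pairs_alt
  simp only [← get_pattern_eq]
  -- both folds become folds over the pattern list ps
  have hfA : (fun (d : PySem.Dict String Int) w =>
        let p := get_pattern w
        let d := if d.contains p then d else d.insert p 0
        d.insert p (d.getD p 0 + 1))
      = fun (d : PySem.Dict String Int) w =>
        d.insert (get_pattern w) (d.getD (get_pattern w) 0 + 1) := by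
    funext d w; exact stepA_eq d (get_pattern w)
  rw [hfA]
  rw [← List.foldl_map (f := get_pattern)
        (g := fun (d : PySem.Dict String Int) p => d.insert p (d.getD p 0 + 1)),
      ← List.foldl_map (f := get_pattern)
        (g := fun (acc : PySem.Dict String Int × Int) p =>
          (acc.1.insert p (acc.1.getD p 0 + 1), acc.2 + acc.1.getD p 0))]
  have hB := bfold (words.map get_pattern) PySem.Dict.empty 0 PySem.Dict.nodup_keys_empty
  rw [hB]
  have hSSe : pvSS PySem.Dict.empty = 0 := by decide
  rw [hSSe]
  -- the shared dict is Counter(ps)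
  rw [PySem.Dict.foldl_insert_getD_add_one_eq_counter]
  have hnd : (PySem.Dict.counter (words.map get_pattern)).keys.Nodup :=
    PySem.Dict.nodup_keys_counter _
  have hvals : ∀ c ∈ (PySem.Dict.counter (words.map get_pattern)).values, (1 : Int) ≤ c := by
    intro c hc
    have : (PySem.Dict.counter (words.map get_pattern)).values
        = (PySem.Set.ofList (words.map get_pattern)).map
            (fun k => ((words.map get_pattern).count k : Int)) := by
      show ((PySem.Dict.counter (words.map get_pattern)).items.map (·.2)) = _
      rw [PySem.Dict.items_counter]
      simp [List.map_map, Function.comp]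
    rw [this] at hc
    rcases List.mem_map.mp hc with ⟨k, hk, rfl⟩
    have : k ∈ words.map get_pattern := (PySem.Set.mem_ofList _ _).mp hk
    have := List.count_pos_iff.mpr this
    exact_mod_cast this
  rw [guardfold _ 0 hvals]
  rw [PySem.Dict.values_eq_map_keys _ hnd 0]
  unfold pvSS
  rw [List.map_map]
  ring_nf
  rfl

-- ===== VERDICT (by name: the statement is the Claim_ definition above) =====
theorem count_similar_pairs_spec : Claim_equal_count_similar_pairs := by
  intro words _
  show count_similar_pairs words = count_similar_pairs_alt words
  exact count_similar_pairs_spec' words
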